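-- pv_equiv track=rewrite | github.com/ddelpozosa/advent_of_code | 2023/10/day.py | replaceWithInLoop
-- ===== SOURCE A (Python) =====
-- def replaceWithInLoop(orGrid, solGrid):
--     countI = 0
--     for y in range(0,len(solGrid)):
--         count = 0
--         for x in range(0, len(solGrid[0])):
--             if str(solGrid[y][x]).isdigit() or str(solGrid[y][x]) == "S":
--                 if orGrid[y][x] == "F" or orGrid[y][x] == "Z" or orGrid[y][x] == "|":
--                     count +=1
--             else:
--                 if count%2==0:
--                     orGrid[y][x] = "0"
--                 else:
--                     orGrid[y][x] = "I"
--                     countI += 1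
--     return orGrid, countI
-- ===== SOURCE B (Python) =====
-- def replaceWithInLoop(orGrid, solGrid):
--     countI = 0
--     w = len(solGrid[0]) if solGrid else 0
--     out = []
--     for oRow, sRow in zip(orGrid, solGrid):
--         # pass 1: prefix[x] = number of crossing walls among columns 0..x-1
--         prefix = [0]
--         for x in range(w):
--             s = str(sRow[x])
--             cross = 1 if (s.isdigit() or s == "S") and oRow[x] in ("F", "Z", "|") else 0
--             prefix.append(prefix[-1] + cross)
--         # pass 2: fill the non-loop cells from the prefix table
--         newRow = list(oRow)
--         for x in range(w):
--             s = str(sRow[x])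
--             if not (s.isdigit() or s == "S"):
--                 if prefix[x] % 2 == 0:
--                     newRow[x] = "0"
--                 else:
--                     newRow[x] = "I"
--                     countI += 1
--         out.append(newRow)
--     out.extend(orGrid[len(solGrid):])
--     return out, countI
-- ===== Notes on version B (the rewrite author's own statement) =====
-- stated objective: alternative
-- what changed: Replaces A's single interleaved ray-cast pass (mutating orGrid while carrying a running crossing count) with a per-row two-pass scheme over zipped row pairs: pass 1 builds a prefix-count table of crossings strictly to the left, pass 2 fills non-loop cells from the table's parity into a fresh row; untouched trailing rows are appended, and B does not mutate its arguments.
import Mathlib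
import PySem

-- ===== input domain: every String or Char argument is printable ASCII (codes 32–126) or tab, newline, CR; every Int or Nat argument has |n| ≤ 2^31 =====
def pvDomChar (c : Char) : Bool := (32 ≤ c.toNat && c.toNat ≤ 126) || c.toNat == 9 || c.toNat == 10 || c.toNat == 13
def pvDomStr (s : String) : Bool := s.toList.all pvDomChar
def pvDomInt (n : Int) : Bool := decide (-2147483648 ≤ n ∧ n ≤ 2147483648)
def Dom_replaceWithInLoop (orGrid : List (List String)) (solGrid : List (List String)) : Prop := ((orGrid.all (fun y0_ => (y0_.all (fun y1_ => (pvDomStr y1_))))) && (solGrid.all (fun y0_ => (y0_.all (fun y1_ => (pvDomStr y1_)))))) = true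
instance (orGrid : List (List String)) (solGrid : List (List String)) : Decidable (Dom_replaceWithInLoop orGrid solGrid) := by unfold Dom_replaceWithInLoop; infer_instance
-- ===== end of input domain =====

-- B replaces A's interleaved ray-cast pass with a per-row prefix-count table plus a separate fill pass
-- (same asymptotic cost); A mutates orGrid in place, B returns a fresh grid — the equivalence proved is about the return value.


-- ===== PORT A =====
-- literal port of A: outer loop over y carries (grid, countI); inner loop over x carries (grid, count, countI);
-- indexing/assignment via pyGetD/pySetD (total forms; Pre_ excludes exactly the IndexError inputs)
def replaceWithInLoop (orGrid : List (List String)) (solGrid : List (List String)) : List (List String) × Int :=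
  (PySem.List.pyRange 0 (solGrid.length : Int) 1).foldl
    (fun (st : List (List String) × Int) (y : Int) =>
      let inner := (PySem.List.pyRange 0 ((PySem.List.pyGetD solGrid 0 []).length : Int) 1).foldl
        (fun (st2 : List (List String) × Int × Int) (x : Int) =>
          let og := st2.1
          let count := st2.2.1
          let cI := st2.2.2
          let s := PySem.List.pyGetD (PySem.List.pyGetD solGrid y []) x ""
          if PySem.Str.strIsdigit s || s == "S" then
            let o := PySem.List.pyGetD (PySem.List.pyGetD og y []) x ""
            if o == "F" || o == "Z" || o == "|" then (og, count + 1, cI) else (og, count, cI)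
          else
            if PySem.Int.mod count 2 == 0 then
              (PySem.List.pySetD og y (PySem.List.pySetD (PySem.List.pyGetD og y []) x "0"), count, cI)
            else
              (PySem.List.pySetD og y (PySem.List.pySetD (PySem.List.pyGetD og y []) x "I"), count, cI + 1))
        (st.1, 0, st.2)
      (inner.1, inner.2.2))
    (orGrid, 0)

-- ===== PORT B =====
-- port of Source B: fold over zipped row pairs; per row, pass 1 builds the prefix table, pass 2 fills from it
def replaceWithInLoop_alt (orGrid : List (List String)) (solGrid : List (List String)) : List (List String) × Int :=
  let w : Int := match solGrid with | [] => 0 | r :: _ => (r.length : Int)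
  let res := (List.zip orGrid solGrid).foldl
    (fun (acc : List (List String) × Int) (pr : List String × List String) =>
      let oRow := pr.1
      let sRow := pr.2
      let pfx := (PySem.List.pyRange 0 w 1).foldl
        (fun (p : List Int) (x : Int) =>
          let s := PySem.List.pyGetD sRow x ""
          let cross : Int :=
            if (PySem.Str.strIsdigit s || s == "S") &&
               (PySem.List.pyGetD oRow x "" == "F" || PySem.List.pyGetD oRow x "" == "Z" ||
                PySem.List.pyGetD oRow x "" == "|") then 1 else 0
          p ++ [PySem.List.pyGetD p (-1) 0 + cross])
        [0]
      let fill := (PySem.List.pyRange 0 w 1).foldl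
        (fun (st : List String × Int) (x : Int) =>
          let s := PySem.List.pyGetD sRow x ""
          if !(PySem.Str.strIsdigit s || s == "S") then
            if PySem.Int.mod (PySem.List.pyGetD pfx x 0) 2 == 0 then
              (PySem.List.pySetD st.1 x "0", st.2)
            else
              (PySem.List.pySetD st.1 x "I", st.2 + 1)
          else st)
        (oRow, acc.2)
      (acc.1 ++ [fill.1], fill.2))
    ([], 0)
  (res.1 ++ PySem.List.slice orGrid (some (solGrid.length : Int)) none, res.2)

-- ===== PRECONDITION & SPEC =====
-- Pre_ = exactly the inputs on which A returns (no IndexError): either the first solGrid row is empty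
-- (nothing is ever indexed), or every scanned row of solGrid and orGrid is long enough.
def Pre_replaceWithInLoop (orGrid : List (List String)) (solGrid : List (List String)) : Prop :=
  (solGrid.headD []).length = 0 ∨
    (solGrid.length ≤ orGrid.length ∧
     (∀ r ∈ solGrid, (solGrid.headD []).length ≤ r.length) ∧
     (∀ r ∈ orGrid.take solGrid.length, (solGrid.headD []).length ≤ r.length))
instance (orGrid : List (List String)) (solGrid : List (List String)) : Decidable (Pre_replaceWithInLoop orGrid solGrid) := by unfold Pre_replaceWithInLoop; infer_instance
def pvWitness_replaceWithInLoop : List (List String) × List (List String) :=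
  ([["F", ".", "."], ["|", ".", "|"]], [["1", ".", "x"], ["S", "y", "2"]])
def Spec_replaceWithInLoop (orGrid : List (List String)) (solGrid : List (List String)) (out : List (List String) × Int) : Prop := out = replaceWithInLoop_alt orGrid solGrid
instance (orGrid : List (List String)) (solGrid : List (List String)) (out : List (List String) × Int) : Decidable (Spec_replaceWithInLoop orGrid solGrid out) := by unfold Spec_replaceWithInLoop; infer_instance

-- ===== CLAIM (what is proved, stated in full; the proofs are below) =====
def Claim_equal_replaceWithInLoop : Prop := ∀ (orGrid : List (List String)) (solGrid : List (List String)), Dom_replaceWithInLoop orGrid solGrid → Pre_replaceWithInLoop orGrid solGrid → Spec_replaceWithInLoop orGrid solGrid (replaceWithInLoop orGrid solGrid)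

-- ===== LEMMAS AND PROOFS =====

-- named copies of the ports' loop bodies (proof bookkeeping only)
def pvStepA (solGrid : List (List String)) (y : Int) (st2 : List (List String) × Int × Int) (x : Int) : List (List String) × Int × Int :=
  let og := st2.1
  let count := st2.2.1
  let cI := st2.2.2
  let s := PySem.List.pyGetD (PySem.List.pyGetD solGrid y []) x ""
  if PySem.Str.strIsdigit s || s == "S" then
    let o := PySem.List.pyGetD (PySem.List.pyGetD og y []) x ""
    if o == "F" || o == "Z" || o == "|" then (og, count + 1, cI) else (og, count, cI)
  else
    if PySem.Int.mod count 2 == 0 then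
      (PySem.List.pySetD og y (PySem.List.pySetD (PySem.List.pyGetD og y []) x "0"), count, cI)
    else
      (PySem.List.pySetD og y (PySem.List.pySetD (PySem.List.pyGetD og y []) x "I"), count, cI + 1)

def pvRowStepA (sRow : List String) (st2 : List String × Int × Int) (x : Int) : List String × Int × Int :=
  let r := st2.1
  let count := st2.2.1
  let cI := st2.2.2
  let s := PySem.List.pyGetD sRow x ""
  if PySem.Str.strIsdigit s || s == "S" then
    let o := PySem.List.pyGetD r x ""
    if o == "F" || o == "Z" || o == "|" then (r, count + 1, cI) else (r, count, cI)
  else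
    if PySem.Int.mod count 2 == 0 then (PySem.List.pySetD r x "0", count, cI)
    else (PySem.List.pySetD r x "I", count, cI + 1)

def pvStepP (oRow sRow : List String) (p : List Int) (x : Int) : List Int :=
  let s := PySem.List.pyGetD sRow x ""
  let cross : Int :=
    if (PySem.Str.strIsdigit s || s == "S") &&
       (PySem.List.pyGetD oRow x "" == "F" || PySem.List.pyGetD oRow x "" == "Z" ||
        PySem.List.pyGetD oRow x "" == "|") then 1 else 0
  p ++ [PySem.List.pyGetD p (-1) 0 + cross]

def pvStepF (sRow : List String) (pfx : List Int) (st : List String × Int) (x : Int) : List String × Int :=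
  let s := PySem.List.pyGetD sRow x ""
  if !(PySem.Str.strIsdigit s || s == "S") then
    if PySem.Int.mod (PySem.List.pyGetD pfx x 0) 2 == 0 then
      (PySem.List.pySetD st.1 x "0", st.2)
    else
      (PySem.List.pySetD st.1 x "I", st.2 + 1)
  else st

def pvRowB (w : Int) (acc : List (List String) × Int) (pr : List String × List String) : List (List String) × Int :=
  let oRow := pr.1
  let sRow := pr.2
  let pfx := (PySem.List.pyRange 0 w 1).foldl (pvStepP oRow sRow) [0]
  let fill := (PySem.List.pyRange 0 w 1).foldl (pvStepF sRow pfx) (oRow, acc.2)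
  (acc.1 ++ [fill.1], fill.2)

lemma portA_eq (orGrid solGrid : List (List String)) :
    replaceWithInLoop orGrid solGrid =
      (PySem.List.pyRange 0 (solGrid.length : Int) 1).foldl
        (fun (st : List (List String) × Int) (y : Int) =>
          let inner := (PySem.List.pyRange 0 ((PySem.List.pyGetD solGrid 0 []).length : Int) 1).foldl
            (pvStepA solGrid y) (st.1, 0, st.2)
          (inner.1, inner.2.2))
        (orGrid, 0) := rfl

lemma portB_eq (orGrid solGrid : List (List String)) :
    replaceWithInLoop_alt orGrid solGrid =
      (let w : Int := match solGrid with | [] => 0 | r :: _ => (r.length : Int)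
       let res := (List.zip orGrid solGrid).foldl (pvRowB w) ([], 0)
       (res.1 ++ PySem.List.slice orGrid (some (solGrid.length : Int)) none, res.2)) := rfl

-- row-level crossing predicate and prefix count
def pvLoopC (s : String) : Bool := PySem.Str.strIsdigit s || s == "S"
def pvWallC (o : String) : Bool := o == "F" || o == "Z" || o == "|"
def pvCross (oRow sRow : List String) (k : Nat) : Bool := pvLoopC (sRow.getD k "") && pvWallC (oRow.getD k "")
def pvCnt (oRow sRow : List String) (x : Nat) : Nat := (List.range x).countP (pvCross oRow sRow)

lemma pvCnt_succ (oRow sRow : List String) (x : Nat) :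
    pvCnt oRow sRow (x + 1) = pvCnt oRow sRow x + (if pvCross oRow sRow x then 1 else 0) := by
  simp [pvCnt, List.range_succ, List.countP_append, List.countP_cons]

-- indexing helpers
lemma getD_append_mid (pre rest : List (List String)) (r : List String) :
    PySem.List.pyGetD (pre ++ r :: rest) ((pre.length : Nat) : Int) [] = r := by
  rw [PySem.List.pyGetD_natCast, List.getD_eq_getElem?_getD,
    List.getElem?_append_right (le_refl _)]
  simp

lemma setD_append_mid (pre rest : List (List String)) (r v : List String) :
    PySem.List.pySetD (pre ++ r :: rest) ((pre.length : Nat) : Int) v = pre ++ v :: rest := by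
  rw [PySem.List.pySetD_natCast]
  induction pre with
  | nil => simp
  | cons p ps ih => simp [ih]

-- pass 1 is correct: the prefix table lists the crossing counts
lemma pfx_eq (oRow sRow : List String) (w : Nat) :
    (PySem.List.pyRange 0 (w : Int) 1).foldl (pvStepP oRow sRow) [0]
      = (List.range (w + 1)).map (fun x => (pvCnt oRow sRow x : Int)) := by
  induction w with
  | zero =>
    simp [PySem.List.pyRange_one_eq_nil, pvCnt]
  | succ w ih =>
    have hcast : ((w : Int) + 1) = ((w + 1 : Nat) : Int) := by push_cast; ring
    rw [show ((w + 1 : Nat) : Int) = (w : Int) + 1 by push_cast; ring,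
      PySem.List.pyRange_one_succ_right (by exact_mod_cast Nat.zero_le w),
      List.foldl_append, ih]
    simp only [List.foldl_cons, List.foldl_nil]
    rw [show (List.range (w + 1)).map (fun x => (pvCnt oRow sRow x : Int))
        = (List.range w).map (fun x => (pvCnt oRow sRow x : Int)) ++ [(pvCnt oRow sRow w : Int)] by
      simp [List.range_succ]]
    unfold pvStepP
    rw [PySem.List.pyGetD_neg_one_append_singleton]
    rw [show List.range (w + 1 + 1) = List.range (w + 1) ++ [w + 1] from List.range_succ]
    simp only [List.map_append, List.map_cons, List.map_nil, List.range_succ, List.append_assoc,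
      List.cons_append, List.nil_append]
    congr 1
    rw [pvCnt_succ]
    unfold pvCross pvLoopC pvWallC
    rw [PySem.List.pyGetD_natCast, PySem.List.pyGetD_natCast]
    split_ifs with h1 <;> simp_all

-- the grid-level inner loop of A only rewrites row y
lemma liftA (solGrid : List (List String)) (xs : List Int) (pre rest : List (List String))
    (r : List String) (c cI : Int) :
    xs.foldl (pvStepA solGrid ((pre.length : Nat) : Int)) (pre ++ r :: rest, c, cI)
      = (pre ++ (xs.foldl (pvRowStepA (PySem.List.pyGetD solGrid ((pre.length : Nat) : Int) [])) (r, c, cI)).1 :: rest,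
         (xs.foldl (pvRowStepA (PySem.List.pyGetD solGrid ((pre.length : Nat) : Int) [])) (r, c, cI)).2) := by
  induction xs generalizing r c cI with
  | nil => simp
  | cons x xs ih =>
    simp only [List.foldl_cons]
    have hstep : pvStepA solGrid ((pre.length : Nat) : Int) (pre ++ r :: rest, c, cI) x
        = (pre ++ (pvRowStepA (PySem.List.pyGetD solGrid ((pre.length : Nat) : Int) []) (r, c, cI) x).1 :: rest,
           (pvRowStepA (PySem.List.pyGetD solGrid ((pre.length : Nat) : Int) []) (r, c, cI) x).2) := by
      unfold pvStepA pvRowStepA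
      simp only [getD_append_mid, setD_append_mid]
      split_ifs <;> rfl
    rw [hstep]
    rcases h : pvRowStepA (PySem.List.pyGetD solGrid ((pre.length : Nat) : Int) []) (r, c, cI) x with ⟨r', c', cI'⟩
    exact ih r' c' cI'

-- A's interleaved row pass equals B's table-driven fill pass
lemma rowEq (oRow sRow : List String) (pfx : List Int) (w x0 : Nat) (r : List String) (cI : Int)
    (hpfx : pfx = (List.range (w + 1)).map (fun x => (pvCnt oRow sRow x : Int)))
    (hr : ∀ k, x0 ≤ k → pvLoopC (sRow.getD k "") = true → r.getD k "" = oRow.getD k "")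
    (hx : x0 ≤ w) :
    (PySem.List.pyRange (x0 : Int) (w : Int) 1).foldl (pvRowStepA sRow) (r, (pvCnt oRow sRow x0 : Int), cI)
      = (((PySem.List.pyRange (x0 : Int) (w : Int) 1).foldl (pvStepF sRow pfx) (r, cI)).1,
         ((pvCnt oRow sRow w : Nat) : Int),
         ((PySem.List.pyRange (x0 : Int) (w : Int) 1).foldl (pvStepF sRow pfx) (r, cI)).2) := by
  induction hn : w - x0 generalizing x0 r cI with
  | zero =>
    have hxw : x0 = w := by omega
    subst hxw
    rw [PySem.List.pyRange_one_eq_nil (le_refl _)]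
    simp
  | succ n ih =>
    have hlt : x0 < w := by omega
    rw [PySem.List.pyRange_one_cons (a := ((x0 : Nat) : Int)) (b := ((w : Nat) : Int))
      (by exact_mod_cast hlt)]
    simp only [List.foldl_cons]
    have hcast : ((x0 : Int) + 1) = ((x0 + 1 : Nat) : Int) := by push_cast; ring
    have hpget : PySem.List.pyGetD sRow ((x0 : Nat) : Int) "" = sRow.getD x0 "" :=
      PySem.List.pyGetD_natCast _ _ _
    have hmod : PySem.List.pyGetD pfx ((x0 : Nat) : Int) 0 = ((pvCnt oRow sRow x0 : Nat) : Int) := by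
      rw [hpfx, PySem.List.pyGetD_natCast, List.getD_eq_getElem?_getD, List.getElem?_map,
        List.getElem?_range (by omega)]
      rfl
    by_cases hloop : (PySem.Str.strIsdigit (sRow.getD x0 "") || sRow.getD x0 "" == "S") = true
    · -- loop cell: A updates the count, B skips
      have hloop' : pvLoopC (sRow.getD x0 "") = true := hloop
      have hro : r.getD x0 "" = oRow.getD x0 "" := hr x0 (le_refl _) hloop'
      have hcnt1 : ((pvCnt oRow sRow (x0 + 1) : Nat) : Int)
          = ((pvCnt oRow sRow x0 : Nat) : Int)
            + (if (oRow.getD x0 "" == "F" || oRow.getD x0 "" == "Z" || oRow.getD x0 "" == "|") = true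
               then 1 else 0) := by
        rw [pvCnt_succ]
        unfold pvCross pvWallC
        rw [hloop']
        split_ifs <;> simp_all
      have hA : pvRowStepA sRow (r, ((pvCnt oRow sRow x0 : Nat) : Int), cI) ((x0 : Nat) : Int)
          = (r, ((pvCnt oRow sRow (x0 + 1) : Nat) : Int), cI) := by
        unfold pvRowStepA
        simp only [hpget]
        rw [if_pos hloop, PySem.List.pyGetD_natCast, hro, hcnt1]
        split_ifs <;> simp
      have hB : pvStepF sRow pfx (r, cI) ((x0 : Nat) : Int) = (r, cI) := by
        unfold pvStepF
        simp only [hpget]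
        rw [if_neg (by rw [hloop]; simp)]
      rw [hA, hB, hcast]
      exact ih (x0 + 1) r cI (fun k hk => hr k (by omega)) (by omega) (by omega)
    · -- non-loop cell: both write the same fill value
      have hloopF : (PySem.Str.strIsdigit (sRow.getD x0 "") || sRow.getD x0 "" == "S") = false := by
        simpa using hloop
      have hcnt : pvCnt oRow sRow (x0 + 1) = pvCnt oRow sRow x0 := by
        rw [pvCnt_succ]
        unfold pvCross pvLoopC
        rw [hloopF]
        simp
      have hrs : ∀ (v : String) (k : Nat), x0 + 1 ≤ k → pvLoopC (sRow.getD k "") = true →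
          (PySem.List.pySetD r ((x0 : Nat) : Int) v).getD k "" = oRow.getD k "" := by
        intro v k hk hl
        rw [PySem.List.pySetD_natCast, List.getD_eq_getElem?_getD,
          List.getElem?_set_ne (by omega), ← List.getD_eq_getElem?_getD]
        exact hr k (by omega) hl
      have hcc : ((pvCnt oRow sRow x0 : Nat) : Int) = ((pvCnt oRow sRow (x0 + 1) : Nat) : Int) := by
        rw [hcnt]
      by_cases hpar : (PySem.Int.mod ((pvCnt oRow sRow x0 : Nat) : Int) 2 == 0) = true
      · have hA : pvRowStepA sRow (r, ((pvCnt oRow sRow x0 : Nat) : Int), cI) ((x0 : Nat) : Int)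
            = (PySem.List.pySetD r ((x0 : Nat) : Int) "0", ((pvCnt oRow sRow x0 : Nat) : Int), cI) := by
          unfold pvRowStepA
          simp only [hpget]
          rw [if_neg (by rw [hloopF]; simp), if_pos hpar]
        have hB : pvStepF sRow pfx (r, cI) ((x0 : Nat) : Int)
            = (PySem.List.pySetD r ((x0 : Nat) : Int) "0", cI) := by
          unfold pvStepF
          simp only [hpget]
          rw [if_pos (by rw [hloopF]; simp), hmod, if_pos hpar]
        rw [hA, hB, hcast, hcc]
        exact ih (x0 + 1) _ cI (hrs "0") (by omega) (by omega)
      · have hA : pvRowStepA sRow (r, ((pvCnt oRow sRow x0 : Nat) : Int), cI) ((x0 : Nat) : Int)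
            = (PySem.List.pySetD r ((x0 : Nat) : Int) "I", ((pvCnt oRow sRow x0 : Nat) : Int), cI + 1) := by
          unfold pvRowStepA
          simp only [hpget]
          rw [if_neg (by rw [hloopF]; simp), if_neg hpar]
        have hB : pvStepF sRow pfx (r, cI) ((x0 : Nat) : Int)
            = (PySem.List.pySetD r ((x0 : Nat) : Int) "I", cI + 1) := by
          unfold pvStepF
          simp only [hpget]
          rw [if_pos (by rw [hloopF]; simp), hmod, if_neg hpar]
        rw [hA, hB, hcast, hcc]
        exact ih (x0 + 1) _ (cI + 1) (hrs "I") (by omega) (by omega)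

-- outer loop: A's grid fold equals B's fold over zipped row pairs
lemma outerEq (solGrid : List (List String)) (s0 : List String) (srest : List (List String))
    (hsol : solGrid = s0 :: srest)
    (pre rest : List (List String)) (cI : Int)
    (hlen : solGrid.length ≤ pre.length + rest.length) (hy : pre.length ≤ solGrid.length) :
    (PySem.List.pyRange ((pre.length : Nat) : Int) (solGrid.length : Int) 1).foldl
        (fun (st : List (List String) × Int) (y : Int) =>
          let inner := (PySem.List.pyRange 0 ((PySem.List.pyGetD solGrid 0 []).length : Int) 1).foldl
            (pvStepA solGrid y) (st.1, 0, st.2)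
          (inner.1, inner.2.2))
        (pre ++ rest, cI)
      = (((List.zip rest (solGrid.drop pre.length)).foldl (pvRowB (s0.length : Int)) (pre, cI)).1
           ++ rest.drop (solGrid.length - pre.length),
         ((List.zip rest (solGrid.drop pre.length)).foldl (pvRowB (s0.length : Int)) (pre, cI)).2) := by
  induction hn : solGrid.length - pre.length generalizing pre rest cI with
  | zero =>
    have hxw : pre.length = solGrid.length := by omega
    rw [hxw, PySem.List.pyRange_one_eq_nil (le_refl _)]
    simp [List.drop_length]
  | succ n ih =>
    have hlt : pre.length < solGrid.length := by omega
    rcases rest with _ | ⟨oRow, rest'⟩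
    · exfalso; simp at hlen; omega
    have hdrop : solGrid.drop pre.length = solGrid[pre.length] :: solGrid.drop (pre.length + 1) :=
      List.drop_eq_getElem_cons hlt
    have hget : PySem.List.pyGetD solGrid ((pre.length : Nat) : Int) [] = solGrid[pre.length] := by
      rw [PySem.List.pyGetD_natCast, List.getD_eq_getElem?_getD, List.getElem?_eq_getElem hlt]
      rfl
    have hw0 : PySem.List.pyGetD solGrid 0 [] = s0 := by
      rw [hsol]; exact PySem.List.pyGetD_zero_cons _ _ _
    rw [PySem.List.pyRange_one_cons (a := ((pre.length : Nat) : Int))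
      (b := ((solGrid.length : Nat) : Int)) (by exact_mod_cast hlt)]
    simp only [List.foldl_cons]
    -- the first outer iteration
    have hinner :
        ((PySem.List.pyRange 0 ((PySem.List.pyGetD solGrid 0 []).length : Int) 1).foldl
          (pvStepA solGrid ((pre.length : Nat) : Int)) (pre ++ oRow :: rest', 0, cI)) =
        (pre ++ ((PySem.List.pyRange 0 (s0.length : Int) 1).foldl
            (pvStepF solGrid[pre.length]
              ((List.range (s0.length + 1)).map (fun x => (pvCnt oRow solGrid[pre.length] x : Int))))
            (oRow, cI)).1 :: rest',
          ((pvCnt oRow solGrid[pre.length] s0.length : Nat) : Int),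
          ((PySem.List.pyRange 0 (s0.length : Int) 1).foldl
            (pvStepF solGrid[pre.length]
              ((List.range (s0.length + 1)).map (fun x => (pvCnt oRow solGrid[pre.length] x : Int))))
            (oRow, cI)).2) := by
      rw [hw0, liftA, hget]
      have hkey := rowEq oRow solGrid[pre.length]
        ((List.range (s0.length + 1)).map (fun x => (pvCnt oRow solGrid[pre.length] x : Int)))
        s0.length 0 oRow cI rfl (fun _ _ _ => rfl) (Nat.zero_le _)
      simp only [show pvCnt oRow solGrid[pre.length] 0 = 0 from by simp [pvCnt], Nat.cast_zero]
        at hkey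
      rw [hkey]
    rw [hinner]
    rw [hdrop]
    simp only [List.zip_cons_cons, List.foldl_cons]
    have hrowB : pvRowB (s0.length : Int) (pre, cI) (oRow, solGrid[pre.length])
        = (pre ++ [((PySem.List.pyRange 0 (s0.length : Int) 1).foldl
            (pvStepF solGrid[pre.length]
              ((List.range (s0.length + 1)).map (fun x => (pvCnt oRow solGrid[pre.length] x : Int))))
            (oRow, cI)).1],
           ((PySem.List.pyRange 0 (s0.length : Int) 1).foldl
            (pvStepF solGrid[pre.length]
              ((List.range (s0.length + 1)).map (fun x => (pvCnt oRow solGrid[pre.length] x : Int))))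
            (oRow, cI)).2) := by
      simp only [pvRowB]
      rw [pfx_eq]
    rw [hrowB]
    -- apply the induction hypothesis with pre := pre ++ [fillRow]
    set F := ((PySem.List.pyRange 0 (s0.length : Int) 1).foldl
            (pvStepF solGrid[pre.length]
              ((List.range (s0.length + 1)).map (fun x => (pvCnt oRow solGrid[pre.length] x : Int))))
            (oRow, cI)) with hF
    have hpre1 : (pre ++ [F.1]).length = pre.length + 1 := by simp
    have hthis := ih (pre ++ [F.1]) rest' F.2 (by simp at hlen ⊢; omega) (by simp; omega)
      (by simp; omega)
    rw [hpre1] at hthis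
    rw [show ((pre.length : Int) + 1) = ((pre.length + 1 : Nat) : Int) by push_cast; ring,
      show pre ++ F.1 :: rest' = (pre ++ [F.1]) ++ rest' by simp, hthis]
    simp

-- w = 0: A's inner loops are empty, B copies every zipped row unchanged
lemma zipCopy (l1 l2 : List (List String)) (acc : List (List String)) :
    (List.zip l1 l2).foldl (pvRowB 0) (acc, 0)
      = (acc ++ (List.zip l1 l2).map Prod.fst, 0) := by
  induction l1 generalizing l2 acc with
  | nil => simp
  | cons a l1 ih =>
    rcases l2 with _ | ⟨b, l2⟩
    · simp
    · simp only [List.zip_cons_cons, List.foldl_cons, List.map_cons]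
      have : pvRowB 0 (acc, 0) (a, b) = (acc ++ [a], 0) := by
        unfold pvRowB
        rw [show (0 : Int) = ((0 : Nat) : Int) from rfl, PySem.List.pyRange_one_eq_nil (le_refl _)]
        simp
      rw [this, ih]
      simp

lemma map_fst_zip_eq_take (l1 l2 : List (List String)) :
    (List.zip l1 l2).map Prod.fst = l1.take l2.length := by
  induction l1 generalizing l2 with
  | nil => simp
  | cons a l1 ih =>
    rcases l2 with _ | ⟨b, l2⟩
    · simp
    · simp [ih]

-- ===== VERDICT (by name: the statement is the Claim_ definition above) =====
theorem replaceWithInLoop_spec : Claim_equal_replaceWithInLoop := by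
  intro orGrid solGrid _hdom hpre
  unfold Spec_replaceWithInLoop
  rw [portA_eq, portB_eq]
  rcases hsol : solGrid with _ | ⟨s0, srest⟩
  · -- empty solGrid: nothing happens on either side
    simp [PySem.List.pyRange_one_eq_nil]
  · subst hsol
    have hslice : PySem.List.slice orGrid (some (((s0 :: srest).length : Nat) : Int)) none
        = orGrid.drop (s0 :: srest).length := PySem.List.slice_from_natCast _ _
    by_cases hw : s0.length = 0
    · -- width 0: A is the identity, B copies the rows it zips
      have hstepid : ∀ (st : List (List String) × Int) (y : Int),
          (let inner := (PySem.List.pyRange 0 ((PySem.List.pyGetD (s0 :: srest) 0 []).length : Int) 1).foldl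
            (pvStepA (s0 :: srest) y) (st.1, 0, st.2)
           (inner.1, inner.2.2)) = st := by
        intro st y
        rw [PySem.List.pyGetD_zero_cons, hw]
        rw [show ((0 : Nat) : Int) = (0 : Int) from rfl, PySem.List.pyRange_one_eq_nil (le_refl _)]
        simp
      have hA : ∀ (ys : List Int) (st : List (List String) × Int),
          ys.foldl (fun (st : List (List String) × Int) (y : Int) =>
            let inner := (PySem.List.pyRange 0 ((PySem.List.pyGetD (s0 :: srest) 0 []).length : Int) 1).foldl
              (pvStepA (s0 :: srest) y) (st.1, 0, st.2)
            (inner.1, inner.2.2)) st = st := by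
        intro ys
        induction ys with
        | nil => intro st; rfl
        | cons y ys ihy => intro st; simp only [List.foldl_cons]; rw [hstepid]; exact ihy st
      rw [hA]
      simp only [hw]
      rw [show ((0 : Nat) : Int) = (0 : Int) from rfl] at *
      rw [zipCopy, map_fst_zip_eq_take, hslice]
      simp [List.take_append_drop]
    · -- positive width: Pre_ gives enough rows in orGrid
      have hlen : (s0 :: srest).length ≤ orGrid.length := by
        rcases hpre with h | ⟨h, _, _⟩
        · exact absurd (by simpa using h) hw
        · exact h
      have := outerEq (s0 :: srest) s0 srest rfl [] orGrid 0 (by simpa using hlen) (by simp)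
      simp only [List.length_nil, List.nil_append, Nat.cast_zero, Nat.sub_zero, List.drop_zero] at this
      rw [this, hslice]
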